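-- pv_equiv track=rewrite | github.com/orbcode/orbuculum | sump2/sump2.py | build_name_map
-- ===== SOURCE A (Python) =====
-- def build_name_map( header_line,bus_widths_list_cp,char_code_list_cp ):
--   """
--    $var wire 1 AA foo  [7] $end
--   """
--   rts = [];
--   for bus_name in header_line.split()[0:-1]:# This removes timescale at end
--     bus_width = bus_widths_list_cp.pop(0);
--     if ( bus_width == 1 ):
--       rts += [ "$var wire 1 " + char_code_list_cp.pop(0) + " " + \
--              bus_name + " $end" ];
--     else:
--       for i in range( bus_width ): # Counts 0..7  for 8bit bus
--         rts += [ "$var wire 1 " + char_code_list_cp.pop(0) + " " + \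
--                   bus_name + " [" + str(bus_width-1-i)+"] $end" ];
--   return rts;
-- ===== SOURCE B (Python) =====
-- def build_name_map(header_line, bus_widths_list_cp, char_code_list_cp):
--     # Two-pass re-implementation: first build (name, bit-index) descriptors
--     # while consuming the widths, then format each line while consuming the
--     # char codes.  Same pop order/counts on both input lists as the original.
--     descs = []
--     for bus_name in header_line.split()[0:-1]:
--         width = bus_widths_list_cp.pop(0)
--         if width == 1:
--             descs.append((bus_name, None))
--         else:
--             for i in range(width):
--                 descs.append((bus_name, width - 1 - i))
--     rts = []
--     for name, idx in descs:
--         code = char_code_list_cp.pop(0)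
--         if idx is None:
--             rts.append("$var wire 1 " + code + " " + name + " $end")
--         else:
--             rts.append("$var wire 1 " + code + " " + name + " [" + str(idx) + "] $end")
--     return rts
-- ===== Notes on version B (the rewrite author's own statement) =====
-- stated objective: alternative
-- what changed: Replaces the interleaved name/width/char-code loop with two passes: one pass that consumes the widths and builds a flat (name, bit-index) descriptor list, then one pass that consumes a char code per descriptor and formats the '$var' line; same pop order and counts on both mutated list arguments.
import Mathlib
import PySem

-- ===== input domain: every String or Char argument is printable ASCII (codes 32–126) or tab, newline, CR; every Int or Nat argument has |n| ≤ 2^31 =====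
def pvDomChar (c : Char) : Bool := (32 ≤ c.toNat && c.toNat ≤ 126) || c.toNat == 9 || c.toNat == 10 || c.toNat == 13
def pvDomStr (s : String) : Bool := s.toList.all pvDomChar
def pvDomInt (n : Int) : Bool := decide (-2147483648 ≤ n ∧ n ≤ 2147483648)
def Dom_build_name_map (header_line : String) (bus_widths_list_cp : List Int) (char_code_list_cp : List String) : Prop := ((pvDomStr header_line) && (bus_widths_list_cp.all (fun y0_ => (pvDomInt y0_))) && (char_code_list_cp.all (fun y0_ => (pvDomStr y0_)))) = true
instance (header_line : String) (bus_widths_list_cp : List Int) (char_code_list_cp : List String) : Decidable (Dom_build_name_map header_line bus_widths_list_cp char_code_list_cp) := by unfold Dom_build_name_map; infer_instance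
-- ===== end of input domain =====

-- B rebuilds the same lines in two passes (descriptor list, then formatting) instead of A's
-- interleaved loop; equivalence is about the RETURN value (both pop the two list arguments
-- in the same order when no exception occurs).

-- ===== PORT A =====
-- inner 'for i in range(bus_width)' loop body: pop a char code, append one line
def pvAstep (name : String) (w : Int) (s : List String × List String) (i : Int) : List String × List String :=
  match s.1 with
  | [] => s   -- Python raises IndexError here; outside Pre_
  | c :: rest => (rest, s.2 ++ ["$var wire 1 " ++ c ++ " " ++ name ++ " [" ++ PySem.Int.toStr (w - 1 - i) ++ "] $end"])

-- outer loop over bus names, carrying the two mutated lists and the accumulator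
def pvAgo : List String → List Int → List String → List String → List String
  | [], _, _, rts => rts
  | _ :: _, [], _, rts => rts   -- bus_widths_list_cp.pop(0) raises; outside Pre_
  | name :: ns, w :: bwl, ccl, rts =>
    if w = 1 then
      match ccl with
      | [] => rts   -- char_code_list_cp.pop(0) raises; outside Pre_
      | c :: ccl' => pvAgo ns bwl ccl' (rts ++ ["$var wire 1 " ++ c ++ " " ++ name ++ " $end"])
    else
      let s := (PySem.List.pyRange 0 w 1).foldl (pvAstep name w) (ccl, rts)
      pvAgo ns bwl s.1 s.2

def build_name_map (header_line : String) (bus_widths_list_cp : List Int) (char_code_list_cp : List String) : List String :=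
  pvAgo (PySem.List.slice (PySem.Str.split₀ header_line) (some 0) (some (-1))) bus_widths_list_cp char_code_list_cp []

-- ===== PORT B =====
-- first pass: consume widths, build flat (name, optional bit index) descriptors
def pvBdescs : List String → List Int → List (String × Option Int)
  | [], _ => []
  | _ :: _, [] => []   -- width pop raises; outside Pre_
  | n :: ns, w :: bwl =>
    (if w = 1 then [(n, none)]
     else (PySem.List.pyRange 0 w 1).map (fun i => (n, some (w - 1 - i)))) ++ pvBdescs ns bwl

-- second pass: consume one char code per descriptor and format the line
def pvBfmt : List (String × Option Int) → List String → List String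
  | [], _ => []
  | _ :: _, [] => []   -- char-code pop raises; outside Pre_
  | (n, idx) :: ds, c :: ccl =>
    (match idx with
     | none => "$var wire 1 " ++ c ++ " " ++ n ++ " $end"
     | some j => "$var wire 1 " ++ c ++ " " ++ n ++ " [" ++ PySem.Int.toStr j ++ "] $end") :: pvBfmt ds ccl

def build_name_map_alt (header_line : String) (bus_widths_list_cp : List Int) (char_code_list_cp : List String) : List String :=
  pvBfmt (pvBdescs (PySem.List.slice (PySem.Str.split₀ header_line) (some 0) (some (-1))) bus_widths_list_cp) char_code_list_cp

-- ===== PRECONDITION & SPEC =====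
-- number of char codes a bus of width w consumes
def pvCost (w : Int) : Nat := if w = 1 then 1 else w.toNat

-- Pre_ excludes exactly the inputs where A raises IndexError: too few widths for the bus
-- names, or too few char codes for the total number of bits.
def Pre_build_name_map (header_line : String) (bus_widths_list_cp : List Int) (char_code_list_cp : List String) : Prop :=
  (PySem.Str.split₀ header_line).dropLast.length ≤ bus_widths_list_cp.length ∧
  ((((PySem.Str.split₀ header_line).dropLast).zip bus_widths_list_cp).map (fun p => pvCost p.2)).sum ≤ char_code_list_cp.length
instance (header_line : String) (bus_widths_list_cp : List Int) (char_code_list_cp : List String) : Decidable (Pre_build_name_map header_line bus_widths_list_cp char_code_list_cp) := by unfold Pre_build_name_map; infer_instance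

def pvWitness_build_name_map : String × List Int × List String := ("x y ts", [1, 2], ["!", "A", "B"])

def Spec_build_name_map (header_line : String) (bus_widths_list_cp : List Int) (char_code_list_cp : List String) (out : List String) : Prop := out = build_name_map_alt header_line bus_widths_list_cp char_code_list_cp
instance (header_line : String) (bus_widths_list_cp : List Int) (char_code_list_cp : List String) (out : List String) : Decidable (Spec_build_name_map header_line bus_widths_list_cp char_code_list_cp out) := by unfold Spec_build_name_map; infer_instance

-- ===== CLAIM (what is proved, stated in full; the proofs are below) =====
def Claim_equal_build_name_map : Prop := ∀ (header_line : String) (bus_widths_list_cp : List Int) (char_code_list_cp : List String), Dom_build_name_map header_line bus_widths_list_cp char_code_list_cp → Pre_build_name_map header_line bus_widths_list_cp char_code_list_cp → Spec_build_name_map header_line bus_widths_list_cp char_code_list_cp (build_name_map header_line bus_widths_list_cp char_code_list_cp)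

-- ===== LEMMAS AND PROOFS =====

-- formatting distributes over an append of descriptor lists when enough codes remain
theorem pvBfmt_append (d1 d2 : List (String × Option Int)) (ccl : List String)
    (h : d1.length ≤ ccl.length) :
    pvBfmt (d1 ++ d2) ccl = pvBfmt d1 ccl ++ pvBfmt d2 (ccl.drop d1.length) := by
  induction d1 generalizing ccl with
  | nil => simp [pvBfmt]
  | cons p ds ih =>
    match ccl with
    | [] => simp at h
    | c :: cs =>
      obtain ⟨n, idx⟩ := p
      simp only [List.cons_append, pvBfmt, List.length_cons, List.drop_succ_cons]
      rw [ih cs (by simpa using h)]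

-- A's inner range-loop equals formatting the mapped descriptor block
theorem pvAinner (name : String) (w : Int) (rs : List Int) (ccl rts : List String)
    (h : rs.length ≤ ccl.length) :
    rs.foldl (pvAstep name w) (ccl, rts) =
      (ccl.drop rs.length, rts ++ pvBfmt (rs.map (fun i => (name, some (w - 1 - i)))) ccl) := by
  induction rs generalizing ccl rts with
  | nil => simp [pvBfmt]
  | cons r rs ih =>
    match ccl with
    | [] => simp at h
    | c :: cs =>
      simp only [List.foldl_cons, pvAstep, List.map_cons, pvBfmt, List.length_cons,
        List.drop_succ_cons]
      rw [ih cs _ (by simpa using h)]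
      simp

-- main loop invariant: A's interleaved loop equals B's build-then-format
theorem pvMain (ns : List String) (bwl : List Int) (ccl rts : List String)
    (h1 : ns.length ≤ bwl.length)
    (h2 : ((ns.zip bwl).map (fun p => pvCost p.2)).sum ≤ ccl.length) :
    pvAgo ns bwl ccl rts = rts ++ pvBfmt (pvBdescs ns bwl) ccl := by
  induction ns generalizing bwl ccl rts with
  | nil => simp [pvAgo, pvBdescs, pvBfmt]
  | cons n ns ih =>
    match bwl with
    | [] => simp at h1
    | w :: bwl =>
      simp only [List.zip_cons_cons, List.map_cons, List.sum_cons] at h2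
      by_cases hw : w = 1
      · subst hw
        match ccl with
        | [] => simp [pvCost] at h2
        | c :: cs =>
          simp only [pvAgo, pvBdescs, if_pos rfl]
          rw [ih bwl cs _ (by simpa using h1) (by simp [pvCost] at h2 ⊢; omega)]
          simp [pvBfmt]
      · have hlen : (PySem.List.pyRange 0 w 1).length = w.toNat := by
          simp [PySem.List.length_pyRange_one]
        have hcost : pvCost w = w.toNat := by simp [pvCost, hw]
        have hle : (PySem.List.pyRange 0 w 1).length ≤ ccl.length := by
          rw [hlen]; omega
        simp only [pvAgo, pvBdescs, if_neg hw]
        rw [pvAinner n w _ ccl rts hle]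
        rw [pvBfmt_append _ _ ccl (by simpa [hlen] using hle)]
        rw [ih bwl _ _ (by simpa using h1)
          (by simp only [List.length_drop, hlen]; omega)]
        simp [hlen]

-- ===== VERDICT (by name: the statement is the Claim_ definition above) =====
theorem build_name_map_spec : Claim_equal_build_name_map := by
  intro h bwl ccl _ hpre
  unfold Spec_build_name_map build_name_map build_name_map_alt
  have hsl : PySem.List.slice (PySem.Str.split₀ h) (some 0) (some (-1)) =
      (PySem.Str.split₀ h).dropLast := by
    simp [PySem.List.slice_zero_start, PySem.List.slice_to_neg_one]
  rw [hsl]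
  exact pvMain _ _ _ _ hpre.1 hpre.2
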